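-- pv_equiv track=rewrite | github.com/ispeedbiz/AutoYT-Advance | semantic_analyzer.py | _find_emotional_climax
-- ===== SOURCE A (Python) =====
-- from typing import List, Dict, Tuple
--
-- def _find_emotional_climax(net_emotions: List[int]) -> int:
--     """
--     Find the point of maximum emotional intensity.
--     """
--     if not net_emotions:
--         return 0
--
--     # Find the point with maximum absolute emotion
--     max_abs_emotion = max(abs(emotion) for emotion in net_emotions)
--     for i, emotion in enumerate(net_emotions):
--         if abs(emotion) == max_abs_emotion:
--             return i
--
--     return 0
-- ===== SOURCE B (Python) =====
-- def _find_emotional_climax(net_emotions):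
--     """Find the point of maximum emotional intensity (first index of max |e|)."""
--     if not net_emotions:
--         return 0
--     return max(range(len(net_emotions)), key=lambda i: abs(net_emotions[i]))
-- ===== Notes on version B (the rewrite author's own statement) =====
-- stated objective: idiomatic
-- what changed: Replaced the two passes (max of absolute values, then a scan for the first index attaining it) with a single argmax over indices via max(range(n), key=...), which keeps the first maximizer.
import Mathlib
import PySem

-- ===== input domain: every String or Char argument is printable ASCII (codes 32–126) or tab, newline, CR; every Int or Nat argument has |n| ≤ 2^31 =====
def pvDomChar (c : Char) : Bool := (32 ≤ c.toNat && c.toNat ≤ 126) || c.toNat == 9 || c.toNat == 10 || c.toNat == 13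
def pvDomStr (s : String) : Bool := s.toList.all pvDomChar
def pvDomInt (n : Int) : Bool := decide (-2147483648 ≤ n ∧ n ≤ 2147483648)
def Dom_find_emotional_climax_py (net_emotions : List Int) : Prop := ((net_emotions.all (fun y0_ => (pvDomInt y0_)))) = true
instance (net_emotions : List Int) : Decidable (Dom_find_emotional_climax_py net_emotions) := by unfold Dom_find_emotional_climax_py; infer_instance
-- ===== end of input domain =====

-- B replaces A's two passes (max of |e|, then scan for its first index) by a single
-- argmax over indices (idiomatic max-by-key); same value on every input.

-- ===== PORT A =====
-- max(abs(e) for e in net_emotions): fold of max over the tail, seeded with |head|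
def pvMaxAbsA (l : List Int) (acc : Int) : Int :=
  match l with
  | [] => acc
  | e :: t => pvMaxAbsA t (max acc |e|)

-- the enumerate-scan: first index i with |e| = m, else 0
def pvScanA (l : List Int) (i : Int) (m : Int) : Int :=
  match l with
  | [] => 0
  | e :: t => if |e| = m then i else pvScanA t (i + 1) m

def find_emotional_climax_py (net_emotions : List Int) : Int :=
  match net_emotions with
  | [] => 0
  | h :: t =>
    let max_abs_emotion := pvMaxAbsA t |h|
    pvScanA (h :: t) 0 max_abs_emotion

-- ===== PORT B =====
-- max(range(len l), key=λ i, |l[i]|): one pass keeping the running best index and key,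
-- updating only on a strictly greater key (Python's max keeps the first maximizer)
def pvArgmaxB (l : List Int) (i : Int) (bi : Int) (bv : Int) : Int :=
  match l with
  | [] => bi
  | e :: t => if bv < |e| then pvArgmaxB t (i + 1) i |e| else pvArgmaxB t (i + 1) bi bv

def find_emotional_climax_py_alt (net_emotions : List Int) : Int :=
  match net_emotions with
  | [] => 0
  | h :: t => pvArgmaxB t 1 0 |h|

-- ===== PRECONDITION & SPEC =====
def Spec_find_emotional_climax_py (net_emotions : List Int) (out : Int) : Prop := out = find_emotional_climax_py_alt net_emotions
instance (net_emotions : List Int) (out : Int) : Decidable (Spec_find_emotional_climax_py net_emotions out) := by unfold Spec_find_emotional_climax_py; infer_instance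

-- ===== CLAIM (what is proved, stated in full; the proofs are below) =====
def Claim_equal_find_emotional_climax_py : Prop := ∀ (net_emotions : List Int), Dom_find_emotional_climax_py net_emotions → Spec_find_emotional_climax_py net_emotions (find_emotional_climax_py net_emotions)

-- ===== LEMMAS AND PROOFS =====
theorem pvMaxAbsA_ge (l : List Int) (acc : Int) : acc ≤ pvMaxAbsA l acc := by
  induction l generalizing acc with
  | nil => simp [pvMaxAbsA]
  | cons e t ih =>
    simp only [pvMaxAbsA]
    exact le_trans (le_max_left acc |e|) (ih _)

theorem pvArgmaxB_eq (l : List Int) (i bi bv : Int) :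
    pvArgmaxB l i bi bv = if pvMaxAbsA l bv = bv then bi else pvScanA l i (pvMaxAbsA l bv) := by
  induction l generalizing i bi bv with
  | nil => simp [pvArgmaxB, pvMaxAbsA]
  | cons e t ih =>
    simp only [pvArgmaxB, pvMaxAbsA, pvScanA]
    by_cases h : bv < |e|
    · rw [if_pos h, ih]
      have hmax : max bv |e| = |e| := max_eq_right h.le
      rw [hmax]
      have hge : |e| ≤ pvMaxAbsA t |e| := pvMaxAbsA_ge t |e|
      have hne : ¬ pvMaxAbsA t |e| = bv := by omega
      rw [if_neg hne]
      by_cases h2 : pvMaxAbsA t |e| = |e|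
      · rw [if_pos h2, if_pos h2.symm]
      · rw [if_neg h2, if_neg (fun hh => h2 hh.symm)]
    · rw [if_neg h, ih]
      have hmax : max bv |e| = bv := max_eq_left (by omega)
      rw [hmax]
      by_cases h2 : pvMaxAbsA t bv = bv
      · rw [if_pos h2, if_pos h2]
      · rw [if_neg h2, if_neg h2]
        have hge : bv ≤ pvMaxAbsA t bv := pvMaxAbsA_ge t bv
        have hne : ¬ |e| = pvMaxAbsA t bv := by omega
        rw [if_neg hne]

-- ===== VERDICT (by name: the statement is the Claim_ definition above) =====
theorem find_emotional_climax_py_spec : Claim_equal_find_emotional_climax_py := by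
  intro l _
  unfold Spec_find_emotional_climax_py
  cases l with
  | nil => rfl
  | cons h t =>
    show pvScanA (h :: t) 0 (pvMaxAbsA t |h|) = pvArgmaxB t 1 0 |h|
    rw [pvArgmaxB_eq]
    simp only [pvScanA]
    by_cases hm : pvMaxAbsA t |h| = |h|
    · rw [if_pos hm, if_pos hm.symm]
    · rw [if_neg hm, if_neg (fun hh => hm hh.symm)]; norm_num
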